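-- pv_equiv track=rewrite | github.com/Volpestyle/vuhlp-code | internal/agent/spec_tools.py | validate_spec_content
-- ===== SOURCE A (Python) =====
-- from typing import List
--
-- def validate_spec_content(content: str) -> tuple[bool, List[str]]:
--     lines = content.split("\n")
--     has_goal = False
--     has_constraints = False
--     has_acceptance = False
--
--     for line in lines:
--         stripped = line.strip()
--         if not stripped.startswith("#"):
--             continue
--         title = stripped.lstrip("#").strip()
--         if not title:
--             continue
--         lower = title.lower()
--         if lower.startswith("goal"):
--             has_goal = True
--         if "constraint" in lower:
--             has_constraints = True
--         if "acceptance" in lower: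
--             has_acceptance = True
--
--     problems: List[str] = []
--     if not has_goal:
--         problems.append("missing heading: # Goal")
--     if not has_constraints:
--         problems.append("missing heading: # Constraints / nuances")
--     if not has_acceptance:
--         problems.append("missing heading: # Acceptance tests")
--     return len(problems) == 0, problems
-- ===== SOURCE B (Python) =====
-- def validate_spec_content(content: str):
--     titles = []
--     for line in content.split("\n"):
--         s = line.strip()
--         if s.startswith("#"):
--             t = s.lstrip("#").strip()
--             if t:
--                 titles.append(t.lower())
--     has_goal = any(t.startswith("goal") for t in titles)
--     has_constraints = any("constraint" in t for t in titles)
--     has_acceptance = any("acceptance" in t for t in titles)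
--     problems = (
--         ([] if has_goal else ["missing heading: # Goal"])
--         + ([] if has_constraints else ["missing heading: # Constraints / nuances"])
--         + ([] if has_acceptance else ["missing heading: # Acceptance tests"])
--     )
--     return len(problems) == 0, problems
-- ===== Notes on version B (the rewrite author's own statement) =====
-- stated objective: simpler
-- what changed: B first extracts the normalized lowercase heading titles in one pass, then computes each of the three flags by an independent any() scan and assembles the problems list by concatenating three conditional pieces, instead of A's single loop threading three boolean accumulators and sequential appends.
import Mathlib
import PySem

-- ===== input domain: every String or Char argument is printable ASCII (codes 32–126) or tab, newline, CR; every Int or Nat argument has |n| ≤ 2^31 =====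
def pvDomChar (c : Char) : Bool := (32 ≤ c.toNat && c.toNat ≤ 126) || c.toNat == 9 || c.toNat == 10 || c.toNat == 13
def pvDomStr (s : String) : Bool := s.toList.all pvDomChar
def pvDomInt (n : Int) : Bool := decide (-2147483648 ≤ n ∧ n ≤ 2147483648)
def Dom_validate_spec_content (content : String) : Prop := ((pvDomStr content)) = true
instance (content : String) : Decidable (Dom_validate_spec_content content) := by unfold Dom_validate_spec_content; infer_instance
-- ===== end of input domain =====

-- B extracts the normalized heading titles once and derives the three flags by independent scans,
-- instead of A's single loop threading three boolean accumulators (objective: simpler).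

-- ===== PORT A =====
-- s.lstrip("#") ported by hand: drops exactly the leading '#' characters (exact for a one-char strip set)
def pyLstripHash (s : String) : String := String.ofList (s.toList.dropWhile (· == '#'))

-- the body of A's for-loop (state: has_goal, has_constraints, has_acceptance)
def stepA (st : Bool × Bool × Bool) (line : String) : Bool × Bool × Bool :=
  if PySem.Str.startswith (PySem.Str.strip line) "#" = false then st
  else if PySem.Str.strip (pyLstripHash (PySem.Str.strip line)) = "" then st
  else
    ((if PySem.Str.startswith (PySem.Str.lower (PySem.Str.strip (pyLstripHash (PySem.Str.strip line)))) "goal" then true else st.1),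
     (if PySem.Str.isIn "constraint" (PySem.Str.lower (PySem.Str.strip (pyLstripHash (PySem.Str.strip line)))) then true else st.2.1),
     (if PySem.Str.isIn "acceptance" (PySem.Str.lower (PySem.Str.strip (pyLstripHash (PySem.Str.strip line)))) then true else st.2.2))

def validate_spec_content (content : String) : Bool × List String :=
  let lines := (PySem.Str.split? content "\n").getD []
  let flags := lines.foldl stepA (false, false, false)
  let problems : List String := []
  let problems := if flags.1 = false then problems ++ ["missing heading: # Goal"] else problems
  let problems := if flags.2.1 = false then problems ++ ["missing heading: # Constraints / nuances"] else problems
  let problems := if flags.2.2 = false then problems ++ ["missing heading: # Acceptance tests"] else problems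
  (problems.length == 0, problems)

-- ===== PORT B =====
def headingTitle? (line : String) : Option String :=
  if PySem.Str.startswith (PySem.Str.strip line) "#" then
    if PySem.Str.strip (pyLstripHash (PySem.Str.strip line)) = "" then none
    else some (PySem.Str.lower (PySem.Str.strip (pyLstripHash (PySem.Str.strip line))))
  else none

def validate_spec_content_alt (content : String) : Bool × List String :=
  let titles : List String := ((PySem.Str.split? content "\n").getD []).filterMap headingTitle?
  let has_goal : Bool := titles.any (fun t => PySem.Str.startswith t "goal")
  let has_constraints : Bool := titles.any (fun t => PySem.Str.isIn "constraint" t)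
  let has_acceptance : Bool := titles.any (fun t => PySem.Str.isIn "acceptance" t)
  let problems :=
    (if has_goal then [] else ["missing heading: # Goal"])
    ++ (if has_constraints then [] else ["missing heading: # Constraints / nuances"])
    ++ (if has_acceptance then [] else ["missing heading: # Acceptance tests"])
  (problems.isEmpty, problems)

-- ===== PRECONDITION & SPEC =====
def Spec_validate_spec_content (content : String) (out : Bool × List String) : Prop := out = validate_spec_content_alt content
instance (content : String) (out : Bool × List String) : Decidable (Spec_validate_spec_content content out) := by unfold Spec_validate_spec_content; infer_instance

-- ===== CLAIM (what is proved, stated in full; the proofs are below) =====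
def Claim_equal_validate_spec_content : Prop := ∀ (content : String), Dom_validate_spec_content content → Spec_validate_spec_content content (validate_spec_content content)

-- ===== LEMMAS AND PROOFS =====

theorem ite_true_or (p b : Bool) : (if p then true else b) = (b || p) := by
  cases p <;> simp

-- A's loop body, expressed through B's title extraction
theorem stepA_eq (st : Bool × Bool × Bool) (l : String) :
    stepA st l = match headingTitle? l with
      | none => st
      | some t => (st.1 || PySem.Str.startswith t "goal",
                   st.2.1 || PySem.Str.isIn "constraint" t,
                   st.2.2 || PySem.Str.isIn "acceptance" t) := by
  unfold stepA
  rcases Bool.eq_false_or_eq_true (PySem.Str.startswith (PySem.Str.strip l) "#") with hsw | hsw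
  case inr =>
    rw [if_pos hsw]
    have h : headingTitle? l = none := by unfold headingTitle?; rw [if_neg (by simpa using hsw)]
    rw [h]
  case inl =>
    rw [if_neg (by simpa using hsw)]
    by_cases ht : PySem.Str.strip (pyLstripHash (PySem.Str.strip l)) = ""
    · rw [if_pos ht]
      have h : headingTitle? l = none := by unfold headingTitle?; rw [if_pos hsw, if_pos ht]
      rw [h]
    · rw [if_neg ht]
      have h : headingTitle? l
          = some (PySem.Str.lower (PySem.Str.strip (pyLstripHash (PySem.Str.strip l)))) := by
        unfold headingTitle?; rw [if_pos hsw, if_neg ht]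
      rw [h]
      simp only [ite_true_or]

-- A's fold over the lines equals the three independent scans over the extracted titles
theorem foldl_stepA (lines : List String) (a b c : Bool) :
    lines.foldl stepA (a, b, c)
    = (a || (lines.filterMap headingTitle?).any (fun t => PySem.Str.startswith t "goal"),
       b || (lines.filterMap headingTitle?).any (fun t => PySem.Str.isIn "constraint" t),
       c || (lines.filterMap headingTitle?).any (fun t => PySem.Str.isIn "acceptance" t)) := by
  induction lines generalizing a b c with
  | nil => simp
  | cons l ls ih =>
    rw [List.foldl_cons, stepA_eq]
    cases hht : headingTitle? l with
    | none => simp only [List.filterMap_cons, hht]; exact ih a b c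
    | some t =>
      simp only [List.filterMap_cons, hht, List.any_cons]
      rw [ih]
      simp [Bool.or_assoc]

-- ===== VERDICT (by name: the statement is the Claim_ definition above) =====
theorem validate_spec_content_spec : Claim_equal_validate_spec_content := by
  intro content _
  show validate_spec_content content = validate_spec_content_alt content
  simp only [validate_spec_content, validate_spec_content_alt]
  rw [foldl_stepA]
  cases hg : (((PySem.Str.split? content "\n").getD []).filterMap headingTitle?).any
      (fun t => PySem.Str.startswith t "goal") <;>
  cases hc : (((PySem.Str.split? content "\n").getD []).filterMap headingTitle?).any
      (fun t => PySem.Str.isIn "constraint" t) <;>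
  cases ha : (((PySem.Str.split? content "\n").getD []).filterMap headingTitle?).any
      (fun t => PySem.Str.isIn "acceptance" t) <;>
  rfl
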